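-- pv_equiv track=rewrite | github.com/HODLKONG64/sam-v2-intelligence | sandbox/contribution_gate.py | _negates_existing_fact
-- ===== SOURCE A (Python) =====
-- _NEGATION_MARKERS = ("not ", "never ", "no ", "false ", "incorrect ")
--
-- def _negates_existing_fact(new_fact: str, existing_facts: list[str]) -> bool:
--     """
--     Return True if *new_fact* appears to negate a keyword asserted in any
--     existing fact (simple heuristic; real validation uses LLM + canon rules).
--     """
--     nf_lower = new_fact.lower()
--     for ex_fact in existing_facts:
--         ef_words = [w for w in ex_fact.lower().split() if len(w) > 4]
--         for word in ef_words:
--             for marker in _NEGATION_MARKERS: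
--                 if marker + word in nf_lower:
--                     return True
--     return False
-- ===== SOURCE B (Python) =====
-- _NEGATION_MARKERS = ("not ", "never ", "no ", "false ", "incorrect ")
--
-- def _negates_existing_fact(new_fact: str, existing_facts: list[str]) -> bool:
--     # Build the set of long existing words once, then scan new_fact once:
--     # at each position where a negation marker matches, look up the following
--     # characters (each candidate length) in the word set.
--     words = set()
--     for f in existing_facts:
--         for w in f.lower().split():
--             if len(w) > 4:
--                 words.add(w)
--     if not words:
--         return False
--     max_len = max(len(w) for w in words)
--     nf = new_fact.lower()
--     n = len(nf)
--     for i in range(n):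
--         for m in _NEGATION_MARKERS:
--             j = i + len(m)
--             if nf[i:j] == m:
--                 for L in range(5, max_len + 1):
--                     if nf[j:j + L] in words:
--                         return True
--     return False
-- ===== Notes on version B (the rewrite author's own statement) =====
-- stated objective: faster
-- what changed: Instead of re-scanning new_fact for marker+word for every word of every existing fact, B builds the set of long existing words once, then does a single left-to-right scan of new_fact, and at each marker occurrence looks up the following characters (one candidate per length up to the longest word) in that set.
import Mathlib
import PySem

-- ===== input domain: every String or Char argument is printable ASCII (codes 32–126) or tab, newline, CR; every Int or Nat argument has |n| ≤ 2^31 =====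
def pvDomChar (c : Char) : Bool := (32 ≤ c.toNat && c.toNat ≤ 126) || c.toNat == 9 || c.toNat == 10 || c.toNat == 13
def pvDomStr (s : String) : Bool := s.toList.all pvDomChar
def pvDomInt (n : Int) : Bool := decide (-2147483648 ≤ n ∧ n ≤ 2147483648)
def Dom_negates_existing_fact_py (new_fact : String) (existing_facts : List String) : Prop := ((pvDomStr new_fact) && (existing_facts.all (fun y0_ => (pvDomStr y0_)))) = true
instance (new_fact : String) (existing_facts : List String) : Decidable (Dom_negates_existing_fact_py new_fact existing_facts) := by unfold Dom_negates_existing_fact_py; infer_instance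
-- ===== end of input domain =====

-- B replaces A's fact×word×marker rescan of new_fact by one set of long existing words built
-- once plus a single left-to-right scan of new_fact for markers (objective: faster).

-- the module constant _NEGATION_MARKERS, shared by both programs
def pvMarkers : List String := ["not ", "never ", "no ", "false ", "incorrect "]

-- ===== PORT A =====
def negates_existing_fact_py (new_fact : String) (existing_facts : List String) : Bool :=
  let nf := PySem.Str.lower new_fact
  existing_facts.any (fun ex_fact =>
    ((PySem.Str.split₀ (PySem.Str.lower ex_fact)).filter (fun w => 4 < PySem.Str.len w)).any
      (fun word => pvMarkers.any (fun marker => PySem.Str.isIn (marker ++ word) nf)))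

-- ===== PORT B =====
-- the set `words` built by Source B's first two loops
def pvWords (existing_facts : List String) : PySem.Set String :=
  existing_facts.foldl
    (fun s f =>
      (PySem.Str.split₀ (PySem.Str.lower f)).foldl
        (fun s w => if 4 < PySem.Str.len w then PySem.Set.add s w else s) s)
    PySem.Set.empty

def negates_existing_fact_py_alt (new_fact : String) (existing_facts : List String) : Bool :=
  let words := pvWords existing_facts
  -- `if not words: return False` and `max_len = max(len(w) for w in words)` together:
  -- max? is none exactly on the empty set
  match PySem.List.max? (words.map PySem.Str.len) id with
  | none => false
  | some maxLen =>
    let nf := PySem.Str.lower new_fact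
    let n := PySem.Str.len nf
    (PySem.List.pyRange 0 n 1).any (fun i =>
      pvMarkers.any (fun m =>
        let j := i + PySem.Str.len m
        if PySem.Str.slice nf (some i) (some j) == m then
          (PySem.List.pyRange 5 (maxLen + 1) 1).any (fun L =>
            PySem.Set.contains (pvWords existing_facts) (PySem.Str.slice nf (some j) (some (j + L))))
        else false))

-- ===== PRECONDITION & SPEC =====
def Spec_negates_existing_fact_py (new_fact : String) (existing_facts : List String) (out : Bool) : Prop := out = negates_existing_fact_py_alt new_fact existing_facts
instance (new_fact : String) (existing_facts : List String) (out : Bool) : Decidable (Spec_negates_existing_fact_py new_fact existing_facts out) := by unfold Spec_negates_existing_fact_py; infer_instance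

-- ===== CLAIM (what is proved, stated in full; the proofs are below) =====
def Claim_equal_negates_existing_fact_py : Prop := ∀ (new_fact : String) (existing_facts : List String), Dom_negates_existing_fact_py new_fact existing_facts → Spec_negates_existing_fact_py new_fact existing_facts (negates_existing_fact_py new_fact existing_facts)

-- ===== LEMMAS AND PROOFS =====

-- splitting a prefix that is an append
theorem pv_append_prefix_iff {α : Type} (a b t : List α) :
    (a ++ b) <+: t ↔ a <+: t ∧ b <+: t.drop a.length := by
  constructor
  · rintro ⟨r, rfl⟩
    refine ⟨⟨b ++ (r ++ []), by simp⟩, ?_⟩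
    rw [List.append_assoc, List.drop_left]
    exact ⟨r, rfl⟩
  · rintro ⟨ha, ⟨r, hr⟩⟩
    refine ⟨r, ?_⟩
    have hta := List.prefix_iff_eq_take.mp ha
    calc a ++ b ++ r = a ++ (b ++ r) := by simp
      _ = t.take a.length ++ t.drop a.length := by rw [← hta, hr]
      _ = t := List.take_append_drop _ _

-- membership in Source B's word set
theorem pv_mem_filter_fold (l : List String) (s0 : PySem.Set String) (x : String) :
    x ∈ l.foldl (fun s w => if 4 < PySem.Str.len w then PySem.Set.add s w else s) s0 ↔
      x ∈ s0 ∨ (x ∈ l ∧ 4 < PySem.Str.len x) := by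
  induction l generalizing s0 with
  | nil => simp
  | cons hd tl ih =>
    simp only [List.foldl_cons]
    by_cases h : 4 < PySem.Str.len hd
    · rw [if_pos h, ih]
      simp only [PySem.Set.mem_add, List.mem_cons]
      constructor
      · rintro ((hx | rfl) | ⟨hx, hp⟩)
        · exact Or.inl hx
        · exact Or.inr ⟨Or.inl rfl, h⟩
        · exact Or.inr ⟨Or.inr hx, hp⟩
      · rintro (hx | ⟨(rfl | hx), hp⟩)
        · exact Or.inl (Or.inl hx)
        · exact Or.inl (Or.inr rfl)
        · exact Or.inr ⟨hx, hp⟩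
    · rw [if_neg h, ih]
      simp only [List.mem_cons]
      constructor
      · rintro (hx | ⟨hx, hp⟩)
        · exact Or.inl hx
        · exact Or.inr ⟨Or.inr hx, hp⟩
      · rintro (hx | ⟨(rfl | hx), hp⟩)
        · exact Or.inl hx
        · exact absurd hp h
        · exact Or.inr ⟨hx, hp⟩

theorem pv_mem_pvWords_aux (facts : List String) (s0 : PySem.Set String) (x : String) :
    x ∈ facts.foldl
        (fun s f =>
          (PySem.Str.split₀ (PySem.Str.lower f)).foldl
            (fun s w => if 4 < PySem.Str.len w then PySem.Set.add s w else s) s) s0 ↔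
      x ∈ s0 ∨ ∃ ex ∈ facts, x ∈ PySem.Str.split₀ (PySem.Str.lower ex) ∧ 4 < PySem.Str.len x := by
  induction facts generalizing s0 with
  | nil => simp
  | cons hd tl ih =>
    simp only [List.foldl_cons, ih, pv_mem_filter_fold, List.mem_cons]
    constructor
    · rintro ((hx | ⟨hw, hp⟩) | ⟨ex, hex, hw, hp⟩)
      · exact Or.inl hx
      · exact Or.inr ⟨hd, Or.inl rfl, hw, hp⟩
      · exact Or.inr ⟨ex, Or.inr hex, hw, hp⟩
    · rintro (hx | ⟨ex, (rfl | hex), hw, hp⟩)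
      · exact Or.inl (Or.inl hx)
      · exact Or.inl (Or.inr ⟨hw, hp⟩)
      · exact Or.inr ⟨ex, hex, hw, hp⟩

theorem pv_mem_pvWords (existing_facts : List String) (x : String) :
    x ∈ pvWords existing_facts ↔
      ∃ ex ∈ existing_facts, x ∈ PySem.Str.split₀ (PySem.Str.lower ex) ∧ 4 < PySem.Str.len x := by
  unfold pvWords
  simpa [PySem.Set.empty] using pv_mem_pvWords_aux existing_facts PySem.Set.empty x

-- each marker is nonempty
theorem pv_marker_ne_nil {m : String} (hm : m ∈ pvMarkers) : m.toList ≠ [] := by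
  fin_cases hm <;> decide

-- max? of a nonempty list is some
theorem pv_max?_cons {α κ : Type} [LT κ] [DecidableLT κ] (key : α → κ) :
    ∀ (l : List α) (a : α), ∃ m, PySem.List.max? (a :: l) key = some m := by
  intro l
  induction l with
  | nil => exact fun a => ⟨a, rfl⟩
  | cons hd tl ih =>
    intro a
    have h : PySem.List.max? (a :: hd :: tl) key =
        PySem.List.max? ((if key a < key hd then hd else a) :: tl) key := by
      unfold PySem.List.max?
      simp only [List.foldl_cons]
      congr 1
      show (if key a < key hd then some hd else some a) = _
      split_ifs <;> rfl
    rw [h]; exact ih _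

theorem pv_A_iff (nf_ : String) (efs : List String) :
    negates_existing_fact_py nf_ efs = true ↔
      ∃ m ∈ pvMarkers, ∃ w ∈ pvWords efs,
        (m.toList ++ w.toList) <:+: (PySem.Str.lower nf_).toList := by
  simp only [negates_existing_fact_py, List.any_eq_true, List.mem_filter,
    PySem.Str.isIn_iff_infix, String.toList_append, decide_eq_true_eq]
  constructor
  · rintro ⟨ex, hex, w, ⟨hw, hlen⟩, m, hm, hinf⟩
    refine ⟨m, hm, w, (pv_mem_pvWords efs w).mpr ⟨ex, hex, hw, by simpa using hlen⟩, hinf⟩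
  · rintro ⟨m, hm, w, hw, hinf⟩
    obtain ⟨ex, hex, hw', hlen⟩ := (pv_mem_pvWords efs w).mp hw
    exact ⟨ex, hex, w, ⟨hw', by simpa using hlen⟩, m, hm, hinf⟩

theorem pv_slice_toList (t : String) (a k : ℕ) :
    (PySem.Str.slice t (some (a : ℤ)) (some ((a : ℤ) + (k : ℤ)))).toList = (t.toList.drop a).take k := by
  rw [PySem.Str.toList_slice, PySem.Chars.slice_eq_listSlice, PySem.List.slice_natCast_add]

theorem pv_B_iff (nf_ : String) (efs : List String) :
    negates_existing_fact_py_alt nf_ efs = true ↔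
      ∃ m ∈ pvMarkers, ∃ w ∈ pvWords efs,
        (m.toList ++ w.toList) <:+: (PySem.Str.lower nf_).toList := by
  unfold negates_existing_fact_py_alt
  dsimp only
  cases hmax : PySem.List.max? ((pvWords efs).map PySem.Str.len) id with
  | none =>
    have hnil : pvWords efs = [] := by
      cases hw : pvWords efs with
      | nil => rfl
      | cons a l =>
        rw [hw, List.map_cons] at hmax
        obtain ⟨m, hm⟩ := pv_max?_cons (id : Int → Int) (l.map PySem.Str.len) (PySem.Str.len a)
        rw [hm] at hmax
        exact absurd hmax (by simp)
    simp [hnil]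
  | some mx =>
    simp only [List.any_eq_true, beq_iff_eq]
    constructor
    · rintro ⟨i, hi, m, hm, hif⟩
      rw [PySem.List.mem_pyRange_iff_of_pos one_pos] at hi
      obtain ⟨hi0, hin, -⟩ := hi
      by_cases hsl : PySem.Str.slice (PySem.Str.lower nf_) (some i) (some (i + PySem.Str.len m)) = m
      · rw [if_pos hsl] at hif
        simp only [List.any_eq_true] at hif
        obtain ⟨L, hL, hcont⟩ := hif
        rw [PySem.List.mem_pyRange_iff_of_pos one_pos] at hL
        obtain ⟨hL5, hLmx, -⟩ := hL
        obtain ⟨a, rfl⟩ : ∃ a : ℕ, i = (a : ℤ) := ⟨i.toNat, (Int.toNat_of_nonneg hi0).symm⟩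
        obtain ⟨lw, rfl⟩ : ∃ k : ℕ, L = (k : ℤ) := ⟨L.toNat, (Int.toNat_of_nonneg (by omega)).symm⟩
        have hmlen : PySem.Str.len m = ((m.toList.length : ℕ) : ℤ) := by simp [PySem.Str.len_eq]
        refine ⟨m, hm, _, (PySem.Set.contains_iff _ _).mp hcont, ?_⟩
        have hmt := congrArg String.toList hsl
        rw [hmlen, pv_slice_toList] at hmt
        have hWt : (PySem.Str.slice (PySem.Str.lower nf_) (some ((a : ℤ) + PySem.Str.len m))
              (some ((a : ℤ) + PySem.Str.len m + (lw : ℤ)))).toList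
            = (((PySem.Str.lower nf_).toList.drop (a + m.toList.length)).take lw) := by
          rw [hmlen, show ((a : ℤ) + ((m.toList.length : ℕ) : ℤ)) = (((a + m.toList.length : ℕ)) : ℤ) by omega]
          exact pv_slice_toList _ _ _
        have hpm : m.toList <+: (PySem.Str.lower nf_).toList.drop a := by
          rw [← hmt]; exact List.take_prefix _ _
        have hpw : (PySem.Str.slice (PySem.Str.lower nf_) (some ((a : ℤ) + PySem.Str.len m))
              (some ((a : ℤ) + PySem.Str.len m + (lw : ℤ)))).toList
            <+: ((PySem.Str.lower nf_).toList.drop a).drop m.toList.length := by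
          rw [hWt, List.drop_drop]
          exact List.take_prefix _ _
        have hpre := (pv_append_prefix_iff _ _ _).mpr ⟨hpm, hpw⟩
        exact hpre.isInfix.trans (List.drop_suffix _ _).isInfix
      · rw [if_neg hsl] at hif
        exact absurd hif (by simp)
    · rintro ⟨m, hm, w, hw, hinf⟩
      obtain ⟨j, hpre⟩ := (PySem.Chars.exists_prefix_drop_iff_isIn (m.toList ++ w.toList) (PySem.Str.lower nf_).toList).mpr
        ((PySem.Chars.isIn_iff_infix _ _).mpr hinf)
      obtain ⟨hm1, hw1⟩ := (pv_append_prefix_iff _ _ _).mp hpre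
      have hj : j < (PySem.Str.lower nf_).toList.length := by
        by_contra hge
        rw [List.drop_eq_nil_of_le (by omega)] at hm1
        exact pv_marker_ne_nil hm (List.prefix_nil.mp hm1)
      have hmlen : PySem.Str.len m = ((m.toList.length : ℤ)) := by simp [PySem.Str.len_eq]
      have hwlen : PySem.Str.len w = ((w.toList.length : ℤ)) := by simp [PySem.Str.len_eq]
      refine ⟨(j : ℤ), ?_, m, hm, ?_⟩
      · rw [PySem.List.mem_pyRange_iff_of_pos one_pos]
        refine ⟨by positivity, ?_, one_dvd _⟩
        rw [PySem.Str.len_eq]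
        exact_mod_cast hj
      · have hsl : PySem.Str.slice (PySem.Str.lower nf_) (some (j : ℤ)) (some ((j : ℤ) + PySem.Str.len m)) = m := by
          apply String.ext
          rw [hmlen, show ((j : ℤ) + ((m.toList.length : ℕ) : ℤ)) = (((j + m.toList.length : ℕ)) : ℤ) by omega]
          rw [show (((j + m.toList.length : ℕ)) : ℤ) = ((j : ℕ) : ℤ) + ((m.toList.length : ℕ) : ℤ) by omega]
          rw [pv_slice_toList]
          exact (List.prefix_iff_eq_take.mp hm1).symm
        rw [if_pos hsl]
        simp only [List.any_eq_true]
        obtain ⟨ex, hex, hwmem, h4⟩ := (pv_mem_pvWords efs w).mp hw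
        have hle : PySem.Str.len w ≤ mx := PySem.List.max?_isMax hmax _ (List.mem_map_of_mem hw)
        refine ⟨PySem.Str.len w, ?_, ?_⟩
        · rw [PySem.List.mem_pyRange_iff_of_pos one_pos]
          exact ⟨by omega, by omega, one_dvd _⟩
        · have hsw : PySem.Str.slice (PySem.Str.lower nf_) (some ((j : ℤ) + PySem.Str.len m)) (some ((j : ℤ) + PySem.Str.len m + PySem.Str.len w)) = w := by
            apply String.ext
            rw [hmlen, hwlen,
              show ((j : ℤ) + ((m.toList.length : ℕ) : ℤ)) = (((j + m.toList.length : ℕ)) : ℤ) by omega,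
              show (((j + m.toList.length : ℕ)) : ℤ) + ((w.toList.length : ℕ) : ℤ) = (((j + m.toList.length : ℕ)) : ℤ) + ((w.toList.length : ℕ) : ℤ) from rfl]
            rw [pv_slice_toList]
            rw [List.drop_drop] at hw1
            exact (List.prefix_iff_eq_take.mp hw1).symm
          rw [hsw]
          exact (PySem.Set.contains_iff _ _).mpr hw

-- the two characterizations agree
theorem pv_main (new_fact : String) (existing_facts : List String) :
    negates_existing_fact_py new_fact existing_facts =
      negates_existing_fact_py_alt new_fact existing_facts := by
  rw [Bool.eq_iff_iff, pv_A_iff, pv_B_iff]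

-- ===== VERDICT (by name: the statement is the Claim_ definition above) =====
theorem negates_existing_fact_py_spec : Claim_equal_negates_existing_fact_py := by
  intro new_fact existing_facts _
  unfold Spec_negates_existing_fact_py
  exact pv_main new_fact existing_facts
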